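-- pv_equiv track=rewrite | github.com/Artur-UF/TCC | ising/teste-clusters.py | split0
-- ===== SOURCE A (Python) =====
-- def split0(array, flag):
--     '''
--     Faz a separação de um array numérico de acordo com uma flag numérica
--     '''
--     arrnd = list()
--     a = list()
--     for i in range(len(array)):
--         if array[i] == flag and type(flag) == int:
--             arrnd.append(a)
--             a = list()
--         else: a.append(array[i])
--     arrnd.append(a)
--     return arrnd[:-1]
-- ===== SOURCE B (Python) =====
-- def split0(array, flag):
--     '''
--     Faz a separação de um array numérico de acordo com uma flag numérica
--     '''
--     if type(flag) is not int:
--         return []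
--     positions = [i for i, x in enumerate(array) if x == flag]
--     out = []
--     prev = -1
--     for p in positions:
--         out.append(array[prev + 1 : p])
--         prev = p
--     return out
-- ===== Notes on version B (the rewrite author's own statement) =====
-- stated objective: alternative
-- what changed: B first collects all flag positions in one enumerate pass and then emits the segments by slicing the array between consecutive flag positions (virtual start -1), instead of A's single accumulator loop that flushes a growing buffer at each flag and drops the trailing buffer with [:-1].
import Mathlib
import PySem

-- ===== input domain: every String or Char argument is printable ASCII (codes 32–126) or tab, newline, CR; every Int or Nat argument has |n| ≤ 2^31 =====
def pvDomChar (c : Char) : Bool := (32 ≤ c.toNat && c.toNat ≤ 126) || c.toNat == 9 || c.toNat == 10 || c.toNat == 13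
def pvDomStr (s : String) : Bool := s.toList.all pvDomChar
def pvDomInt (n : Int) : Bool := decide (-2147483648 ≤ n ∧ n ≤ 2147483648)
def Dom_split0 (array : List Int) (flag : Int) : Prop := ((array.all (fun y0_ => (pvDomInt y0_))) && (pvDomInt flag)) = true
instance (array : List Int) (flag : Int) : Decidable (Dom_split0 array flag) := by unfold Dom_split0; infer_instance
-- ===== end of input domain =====

-- B builds the flag-position list first, then slices between consecutive positions; same O(n) cost, different structure.
-- (Python A's 'type(flag) == int' guard is always true under the Int typing of flag, so the ports omit it.)

-- ===== PORT A =====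
-- A's loop body as a named helper (the if on array[i] == flag, flushing the buffer)
def stepA (flag : Int) (st : List (List Int) × List Int) (x : Int) : List (List Int) × List Int :=
  if x = flag then (st.1 ++ [st.2], []) else (st.1, st.2 ++ [x])

def split0 (array : List Int) (flag : Int) : List (List Int) :=
  let s := (PySem.List.pyRange 0 (array.length : Int) 1).foldl
    (fun st i => stepA flag st (PySem.List.pyGetD array i 0)) (([], []) : List (List Int) × List Int)
  let arrnd := s.1 ++ [s.2]
  PySem.List.slice arrnd none (some (-1))

-- ===== PORT B =====
def split0_alt (array : List Int) (flag : Int) : List (List Int) :=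
  let positions := ((PySem.List.enumerate array 0).filter (fun px => px.2 == flag)).map (fun px => px.1)
  (positions.foldl
    (fun (st : List (List Int) × Int) p =>
      (st.1 ++ [PySem.List.slice array (some (st.2 + 1)) (some p)], p)) (([], -1) : List (List Int) × Int)).1

-- ===== PRECONDITION & SPEC =====
def Spec_split0 (array : List Int) (flag : Int) (out : List (List Int)) : Prop := out = split0_alt array flag
instance (array : List Int) (flag : Int) (out : List (List Int)) : Decidable (Spec_split0 array flag out) := by unfold Spec_split0; infer_instance

-- ===== CLAIM (what is proved, stated in full; the proofs are below) =====
def Claim_equal_split0 : Prop := ∀ (array : List Int) (flag : Int), Dom_split0 array flag → Spec_split0 array flag (split0 array flag)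

-- ===== LEMMAS AND PROOFS =====

/-- The common characterization: segments between flags, trailing buffer dropped. -/
def segs (flag : Int) : List Int → List Int → List (List Int)
  | [], _ => []
  | x :: xs, cur => if x = flag then cur :: segs flag xs [] else segs flag xs (cur ++ [x])

lemma foldA_eq_segs (flag : Int) : ∀ (xs : List Int) (acc : List (List Int)) (cur : List Int),
    (xs.foldl (stepA flag) (acc, cur)).1 = acc ++ segs flag xs cur := by
  intro xs
  induction xs with
  | nil => intro acc cur; simp [segs]
  | cons x xs ih =>
    intro acc cur
    by_cases h : x = flag
    · simp [stepA, segs, h, ih]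
    · simp [stepA, segs, h, ih]

/-- positions of flag in v, enumerated from start s -/
def posFrom (flag : Int) (v : List Int) (s : Int) : List Int :=
  ((PySem.List.enumerate v s).filter (fun px => px.2 == flag)).map (fun px => px.1)

lemma posFrom_nil (flag s : Int) : posFrom flag [] s = [] := by simp [posFrom, PySem.List.enumerate_nil]

lemma posFrom_cons (flag s x : Int) (xs : List Int) :
    posFrom flag (x :: xs) s =
      if x = flag then s :: posFrom flag xs (s + 1) else posFrom flag xs (s + 1) := by
  by_cases h : x = flag <;> simp [posFrom, PySem.List.enumerate_cons, h]

/-- B's fold, named -/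
def foldB (array : List Int) (ps : List Int) (st : List (List Int) × Int) : List (List Int) × Int :=
  ps.foldl (fun st p => (st.1 ++ [PySem.List.slice array (some (st.2 + 1)) (some p)], p)) st

lemma foldB_acc (array : List Int) : ∀ (ps : List Int) (out : List (List Int)) (prev : Int),
    (foldB array ps (out, prev)).1 = out ++ (foldB array ps ([], prev)).1 := by
  intro ps
  induction ps with
  | nil => intro out prev; simp [foldB]
  | cons p ps ih =>
    intro out prev
    simp only [foldB, List.foldl_cons, List.nil_append] at *
    rw [ih (out ++ [PySem.List.slice array (some (prev + 1)) (some p)]) p,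
        ih [PySem.List.slice array (some (prev + 1)) (some p)] p]
    simp

lemma slice_mid (u cur v : List Int) :
    PySem.List.slice (u ++ cur ++ v) (some ((u.length : Int))) (some ((u.length : Int) + (cur.length : Int))) = cur := by
  rw [PySem.List.slice_toNat _ (by positivity) (by positivity)]
  have h1 : ((u.length : Int)).toNat = u.length := by omega
  have h2 : (((u.length : Int)) + ((cur.length : Int))).toNat = u.length + cur.length := by omega
  rw [h1, h2]
  have : (u ++ cur ++ v).drop u.length = cur ++ v := by
    rw [List.append_assoc, List.drop_left]
  rw [this]
  simp

lemma foldB_segs (flag : Int) : ∀ (v u cur : List Int),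
    (foldB (u ++ cur ++ v) (posFrom flag v ((u.length : Int) + (cur.length : Int))) ([], (u.length : Int) - 1)).1
      = segs flag v cur := by
  intro v
  induction v with
  | nil => intro u cur; simp [posFrom_nil, foldB, segs]
  | cons x xs ih =>
    intro u cur
    rw [posFrom_cons]
    by_cases h : x = flag
    · rw [if_pos h]
      simp only [segs, if_pos h]
      have step1 : (foldB (u ++ cur ++ x :: xs)
          (((u.length : Int) + (cur.length : Int)) :: posFrom flag xs ((u.length : Int) + (cur.length : Int) + 1))
          ([], (u.length : Int) - 1)).1
        = (foldB (u ++ cur ++ x :: xs)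
            (posFrom flag xs ((u.length : Int) + (cur.length : Int) + 1))
            ([] ++ [PySem.List.slice (u ++ cur ++ x :: xs) (some ((u.length : Int) - 1 + 1))
                     (some ((u.length : Int) + (cur.length : Int)))],
             (u.length : Int) + (cur.length : Int))).1 := rfl
      rw [step1]
      rw [show (u.length : Int) - 1 + 1 = (u.length : Int) from by ring, slice_mid]
      rw [List.nil_append, foldB_acc]
      have key := ih (u ++ cur ++ [x]) []
      simp only [List.length_append, List.length_cons, List.length_nil, List.append_nil,
        List.append_assoc, List.cons_append, List.nil_append] at key
      push_cast at key
      simp only [add_zero] at key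
      rw [show (u.length : Int) + ((cur.length : Int) + 1) - 1 = (u.length : Int) + (cur.length : Int) from by ring] at key
      rw [show (u.length : Int) + ((cur.length : Int) + 1) = (u.length : Int) + (cur.length : Int) + 1 from by ring] at key
      have harr : u ++ cur ++ x :: xs = u ++ (cur ++ x :: xs) := by simp
      rw [harr, key]
      simp
    · rw [if_neg h]
      simp only [segs, if_neg h]
      have harr : u ++ cur ++ x :: xs = u ++ (cur ++ [x]) ++ xs := by simp
      have hlen : ((cur ++ [x]).length : Int) = (cur.length : Int) + 1 := by simp
      have key := ih u (cur ++ [x])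
      rw [hlen] at key
      rw [harr]
      rw [show (u.length : Int) + (cur.length : Int) + 1 = (u.length : Int) + ((cur.length : Int) + 1) from by ring]
      exact key

lemma split0_alt_eq_segs (array : List Int) (flag : Int) :
    split0_alt array flag = segs flag array [] := by
  have h := foldB_segs flag array [] []
  simpa [split0_alt, posFrom, foldB] using h

lemma split0_eq_segs (array : List Int) (flag : Int) :
    split0 array flag = segs flag array [] := by
  simp only [split0]
  rw [PySem.List.foldl_pyRange_zero_pyGetD' array 0 (stepA flag) (([], []) : List (List Int) × List Int)]
  rw [foldA_eq_segs flag array [] []]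
  simp only [List.nil_append]
  -- slice (l ++ [x]) none (some (-1)) = l
  simp [PySem.List.slice]

-- ===== VERDICT (by name: the statement is the Claim_ definition above) =====
theorem split0_spec : Claim_equal_split0 := by
  intro array flag _
  unfold Spec_split0
  rw [split0_eq_segs, split0_alt_eq_segs]
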